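-- pv_equiv track=rewrite | github.com/TessFerrandez/AdventOfCode-Python | 2015/day14.py | part2
-- ===== SOURCE A (Python) =====
-- from typing import List, Tuple
--
-- def travel(seconds: int, deer: Tuple[str, int, int, int]) -> List[int]:
--     traveled = []
--     current_location = 0
--     second = 0
--     _, speed, fly_time, rest_time = deer
--     while second <= seconds:
--         for fs in range(fly_time):
--             current_location += speed
--             traveled.append(current_location)
--         for rs in range(rest_time):
--             traveled.append(current_location)
--         second += 1
--     return traveled[: seconds + 1]
--
-- def part2(deer: List[Tuple[str, int, int, int]]) -> int:
--     distances = []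
--     num_deer = len(deer)
--     points = [0] * num_deer
--     for d in deer:
--         distances.append(travel(2503, d))
--     for i in range(2503):
--         second_distances = [distances[j][i] for j in range(num_deer)]
--         best_distance = max(second_distances)
--         leaders = [i for i, distance in enumerate(second_distances) if distance == best_distance]
--         for d in leaders:
--             points[d] += 1
--
--     return max(points)
-- ===== SOURCE B (Python) =====
-- from typing import List, Tuple
--
-- def distance(speed: int, fly_time: int, rest_time: int, t: int) -> int:
--     # closed-form position after t seconds; a non-positive phase contributes
--     # nothing (range semantics), hence the clamping to 0
--     fly = max(fly_time, 0)
--     rest = max(rest_time, 0)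
--     cycle = fly + rest
--     return (t // cycle) * fly * speed + min(t % cycle, fly) * speed
--
-- def part2(deer: List[Tuple[str, int, int, int]]) -> int:
--     points = [0] * len(deer)
--     for t in range(1, 2504):
--         dists = [distance(speed, fly, rest, t) for _, speed, fly, rest in deer]
--         best = max(dists)
--         points = [p + 1 if d == best else p for p, d in zip(points, dists)]
--     return max(points)
-- ===== Notes on version B (the rewrite author's own statement) =====
-- stated objective: faster
-- what changed: Replaces the per-second simulation that materialises a travel list of length 2504*(fly+rest) for every reindeer (then indexes into it each second) with a closed-form distance formula (full cycles plus a clamped partial fly phase) evaluated directly inside the scoring loop, and replaces the enumerate/leaders index bookkeeping with a zip over points and distances.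
-- outside the precondition, e.g. on part2([]): A raises ValueError, B raises ValueError
import Mathlib
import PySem

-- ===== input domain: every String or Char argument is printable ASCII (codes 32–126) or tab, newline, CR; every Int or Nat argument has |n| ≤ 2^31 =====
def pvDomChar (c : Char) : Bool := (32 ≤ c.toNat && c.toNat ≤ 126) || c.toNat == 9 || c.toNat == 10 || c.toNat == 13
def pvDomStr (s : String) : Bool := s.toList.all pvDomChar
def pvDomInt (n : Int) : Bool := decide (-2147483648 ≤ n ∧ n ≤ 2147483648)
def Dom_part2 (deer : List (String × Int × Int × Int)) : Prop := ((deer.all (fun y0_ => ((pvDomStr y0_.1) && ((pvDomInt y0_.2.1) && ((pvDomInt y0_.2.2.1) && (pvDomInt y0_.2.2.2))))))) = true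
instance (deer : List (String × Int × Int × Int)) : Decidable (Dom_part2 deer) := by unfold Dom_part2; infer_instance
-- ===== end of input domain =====

-- B replaces A's per-second travel-list simulation by a closed-form distance
-- formula inside the scoring loop (objective: simpler).

-- ===== PORT A =====
-- literal port of travel(seconds, deer): the while loop runs for
-- second = 0, 1, …, seconds, i.e. over pyRange 0 (seconds+1) 1; state = (traveled, current_location).
-- Python's O(1) traveled.append(x) is encoded as the usual reversed accumulator
-- (cons, with one reverse at the end) so the port evaluates in linear time.
def travelA (seconds : Int) (d : String × Int × Int × Int) : List Int :=
  let speed := d.2.1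
  let fly := d.2.2.1
  let rest := d.2.2.2
  let st := (PySem.List.pyRange 0 (seconds + 1) 1).foldl
    (fun (st : List Int × Int) _ =>
      let st1 := (PySem.List.pyRange 0 fly 1).foldl
        (fun (st : List Int × Int) _ => ((st.2 + speed) :: st.1, st.2 + speed)) st
      (PySem.List.pyRange 0 rest 1).foldl
        (fun (st : List Int × Int) _ => (st.2 :: st.1, st.2)) st1) ([], 0)
  PySem.List.slice st.1.reverse none (some (seconds + 1))

def part2 (deer : List (String × Int × Int × Int)) : Int :=
  let numDeer : Int := deer.length
  let distances := deer.foldl (fun acc d => acc ++ [travelA 2503 d]) []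
  let points0 : List Int := List.replicate deer.length 0
  let points := (PySem.List.pyRange 0 2503 1).foldl
    (fun points i =>
      let secondDistances := (PySem.List.pyRange 0 numDeer 1).map
        (fun j => (PySem.List.pyGet? ((PySem.List.pyGet? distances j).getD []) i).getD 0)
      let best := (PySem.List.max? secondDistances (fun x => x)).getD 0
      let leaders := ((PySem.List.enumerate secondDistances 0).filter
        (fun p => p.2 == best)).map (fun p => p.1)
      leaders.foldl (fun pts d => pts.modify d.toNat (· + 1)) points) points0
  (PySem.List.max? points (fun x => x)).getD 0

-- ===== PORT B =====
def distanceB (speed fly rest t : Int) : Int :=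
  let f := max fly 0
  let r := max rest 0
  let c := f + r
  PySem.Int.floordiv t c * f * speed + min (PySem.Int.mod t c) f * speed

def part2_alt (deer : List (String × Int × Int × Int)) : Int :=
  let points := (PySem.List.pyRange 1 2504 1).foldl
    (fun (points : List Int) t =>
      let dists := deer.map (fun d => distanceB d.2.1 d.2.2.1 d.2.2.2 t)
      let best := (PySem.List.max? dists (fun x => x)).getD 0
      List.zipWith (fun p dd => if dd = best then p + 1 else p) points dists)
    (List.replicate deer.length 0)
  (PySem.List.max? points (fun x => x)).getD 0

-- ===== PRECONDITION & SPEC =====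
-- Pre_ excludes exactly the inputs where the Python A raises: the empty list
-- (ValueError from max([])) and any reindeer whose fly and rest phases are both
-- non-positive, so that travel() produces an empty list (IndexError); Python B
-- also raises on exactly these inputs (ValueError resp. ZeroDivisionError).
def Pre_part2 (deer : List (String × Int × Int × Int)) : Prop :=
  deer ≠ [] ∧ ∀ d ∈ deer, 0 < max d.2.2.1 0 + max d.2.2.2 0
instance (deer : List (String × Int × Int × Int)) : Decidable (Pre_part2 deer) := by
  unfold Pre_part2; infer_instance
def pvWitness_part2 : (List (String × Int × Int × Int)) := [("Comet", 14, 10, 127), ("Dancer", 16, 11, 162)]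
def Spec_part2 (deer : List (String × Int × Int × Int)) (out : Int) : Prop := out = part2_alt deer
instance (deer : List (String × Int × Int × Int)) (out : Int) : Decidable (Spec_part2 deer out) := by
  unfold Spec_part2; infer_instance

-- ===== CLAIM (what is proved, stated in full; the proofs are below) =====
def Claim_equal_part2 : Prop := ∀ (deer : List (String × Int × Int × Int)), Dom_part2 deer → Pre_part2 deer → Spec_part2 deer (part2 deer)

-- ===== LEMMAS AND PROOFS =====

-- closed form of the i-th entry (0-based) of the simulated travel list
def dA (s : Int) (F R : Nat) (i : Nat) : Int :=
  ((i / (F + R) * F : Nat) : Int) * s + ((min (i % (F + R) + 1) F : Nat) : Int) * s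

theorem flyFold (s : Int) (F : Nat) :
    ∀ (tr : List Int) (loc : Int),
      (List.range F).foldl (fun (st : List Int × Int) _ => ((st.2 + s) :: st.1, st.2 + s)) (tr, loc)
      = (((List.range F).map (fun (k : Nat) => loc + ((k : Int) + 1) * s)).reverse ++ tr,
          loc + (F : Int) * s) := by
  induction F with
  | zero => simp
  | succ n ih =>
    intro tr loc
    rw [List.range_succ, List.foldl_append, ih, List.map_append, List.reverse_append]
    simp only [List.foldl_cons, List.foldl_nil, List.map_cons, List.map_nil,
      List.reverse_cons, List.reverse_nil, List.nil_append, List.cons_append]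
    have h1 : loc + (n : Int) * s + s = loc + ((n : Int) + 1) * s := by ring
    have h2 : ((n + 1 : Nat) : Int) = (n : Int) + 1 := by push_cast; ring
    rw [h1, h2]

theorem restFold (R : Nat) :
    ∀ (tr : List Int) (loc : Int),
      (List.range R).foldl (fun (st : List Int × Int) _ => (st.2 :: st.1, st.2)) (tr, loc)
      = (List.replicate R loc ++ tr, loc) := by
  induction R with
  | zero => simp
  | succ n ih =>
    intro tr loc
    rw [List.range_succ, List.foldl_append, ih, List.replicate_succ]
    simp

theorem dA_in_cycle (s : Int) (F R : Nat) (hC : 0 < F + R) (n p : Nat) (hp : p < F + R) :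
    dA s F R (n * (F + R) + p)
      = ((n * F : Nat) : Int) * s + ((min (p + 1) F : Nat) : Int) * s := by
  unfold dA
  have h1 : (n * (F + R) + p) / (F + R) = n := by
    rw [Nat.mul_comm n (F + R), Nat.mul_add_div hC, Nat.div_eq_of_lt hp]
    omega
  have h2 : (n * (F + R) + p) % (F + R) = p := by
    rw [Nat.mul_comm n (F + R), Nat.mul_add_mod, Nat.mod_eq_of_lt hp]
  rw [h1, h2]

theorem outerFold (s : Int) (F R : Nat) (hC : 0 < F + R) (n : Nat) :
    (List.range n).foldl
      (fun (st : List Int × Int) _ =>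
        (List.range R).foldl (fun (st : List Int × Int) _ => (st.2 :: st.1, st.2))
          ((List.range F).foldl (fun (st : List Int × Int) _ => ((st.2 + s) :: st.1, st.2 + s)) st))
      ([], 0)
    = (((List.range (n * (F + R))).map (dA s F R)).reverse, ((n * F : Nat) : Int) * s) := by
  induction n with
  | zero => simp
  | succ m ih =>
    rw [List.range_succ, List.foldl_append, ih]
    simp only [List.foldl_cons, List.foldl_nil]
    rw [flyFold, restFold]
    have hsplit : (m + 1) * (F + R) = m * (F + R) + (F + R) := by ring
    rw [hsplit, List.range_add, List.range_add]
    simp only [List.map_append, List.map_map, List.reverse_append]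
    have hfly : (List.range F).map (dA s F R ∘ fun x => m * (F + R) + x)
        = (List.range F).map (fun (k : Nat) => ((m * F : Nat) : Int) * s + ((k : Int) + 1) * s) := by
      apply List.map_congr_left
      intro k hk
      have hkF : k < F := List.mem_range.mp hk
      have : dA s F R (m * (F + R) + k)
          = ((m * F : Nat) : Int) * s + ((min (k + 1) F : Nat) : Int) * s :=
        dA_in_cycle s F R hC m k (by omega)
      simp only [Function.comp]
      rw [this, Nat.min_eq_left (by omega)]
      push_cast; ring
    have hrest : (List.range R).map (dA s F R ∘ (fun x => m * (F + R) + x) ∘ fun x => F + x)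
        = List.replicate R (((m * F : Nat) : Int) * s + ((F : Nat) : Int) * s) := by
      apply List.eq_replicate_iff.mpr
      constructor
      · simp
      · intro b hb
        obtain ⟨j, hj, rfl⟩ := List.mem_map.mp hb
        have hjR : j < R := List.mem_range.mp hj
        simp only [Function.comp]
        rw [dA_in_cycle s F R hC m (F + j) (by omega), Nat.min_eq_right (by omega)]
    rw [hfly, hrest, List.reverse_replicate]
    have h2 : ((m * F : Nat) : Int) * s + ((F : Nat) : Int) * s = (((m + 1) * F : Nat) : Int) * s := by
      push_cast; ring
    rw [List.append_assoc, h2]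

theorem natKey (F R k : Nat) (hC : 0 < F + R) :
    k / (F + R) * F + min (k % (F + R) + 1) F
      = (k + 1) / (F + R) * F + min ((k + 1) % (F + R)) F := by
  set C := F + R with hCdef
  have hmod : k % C < C := Nat.mod_lt k hC
  have hdm : C * (k / C) + k % C = k := Nat.div_add_mod k C
  by_cases h : k % C + 1 = C
  · have hk1 : k + 1 = C * (k / C + 1) := by rw [Nat.mul_add, Nat.mul_one]; omega
    have hdiv : (k + 1) / C = k / C + 1 := by rw [hk1, Nat.mul_div_cancel_left _ hC]
    have hmod1 : (k + 1) % C = 0 := by rw [hk1, Nat.mul_mod_right]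
    have hFC : F ≤ C := by omega
    rw [hdiv, hmod1, h, Nat.min_eq_right hFC, Nat.min_eq_left (Nat.zero_le F)]
    ring
  · have hlt : k % C + 1 < C := by omega
    have hk1 : k + 1 = C * (k / C) + (k % C + 1) := by omega
    have hdiv : (k + 1) / C = k / C := by
      rw [hk1, Nat.mul_add_div hC, Nat.div_eq_of_lt hlt]
      omega
    have hmod1 : (k + 1) % C = k % C + 1 := by
      rw [hk1, Nat.mul_add_mod, Nat.mod_eq_of_lt hlt]
    rw [hdiv, hmod1]

theorem travelA_closed (d : String × Int × Int × Int)
    (h : 0 < max d.2.2.1 0 + max d.2.2.2 0) :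
    travelA 2503 d
      = ((List.range (2504 * (d.2.2.1.toNat + d.2.2.2.toNat))).map
          (dA d.2.1 d.2.2.1.toNat d.2.2.2.toNat)).take 2504 := by
  have hC : 0 < d.2.2.1.toNat + d.2.2.2.toNat := by
    have h1 := Int.toNat_eq_max d.2.2.1
    have h2 := Int.toNat_eq_max d.2.2.2
    omega
  unfold travelA
  simp only [PySem.List.pyRange_one, List.foldl_map, Int.sub_zero]
  norm_num
  rw [show (Int.toNat 2504) = 2504 from rfl]
  rw [outerFold d.2.1 d.2.2.1.toNat d.2.2.2.toNat hC 2504]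
  have hfst : ((((List.range (2504 * (d.2.2.1.toNat + d.2.2.2.toNat))).map
      (dA d.2.1 d.2.2.1.toNat d.2.2.2.toNat)).reverse,
      ((2504 * d.2.2.1.toNat : Nat) : Int) * d.2.1) : List Int × Int).1
    = ((List.range (2504 * (d.2.2.1.toNat + d.2.2.2.toNat))).map
      (dA d.2.1 d.2.2.1.toNat d.2.2.2.toNat)).reverse := rfl
  rw [hfst, List.reverse_reverse]
  rw [PySem.List.slice_to _ (b := 2504) (by norm_num)]
  rfl

theorem travel_get (d : String × Int × Int × Int)
    (h : 0 < max d.2.2.1 0 + max d.2.2.2 0) (k : Nat) (hk : k < 2504) :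
    ((PySem.List.pyGet? (travelA 2503 d) (k : Int)).getD 0)
      = distanceB d.2.1 d.2.2.1 d.2.2.2 ((k : Int) + 1) := by
  have hF := Int.toNat_eq_max d.2.2.1
  have hR := Int.toNat_eq_max d.2.2.2
  have hC : 0 < d.2.2.1.toNat + d.2.2.2.toNat := by omega
  have hklt : k < 2504 * (d.2.2.1.toNat + d.2.2.2.toNat) := by
    calc k < 2504 := hk
    _ = 2504 * 1 := by norm_num
    _ ≤ 2504 * (d.2.2.1.toNat + d.2.2.2.toNat) := Nat.mul_le_mul_left 2504 hC
  rw [travelA_closed d h, PySem.List.pyGet?_natCast]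
  rw [List.getElem?_take, if_pos hk]
  rw [List.getElem?_map, List.getElem?_range hklt]
  simp only [Option.map_some, Option.getD_some, distanceB, dA]
  rw [← hF, ← hR]
  have hcast1 : (k : Int) + 1 = ((k + 1 : Nat) : Int) := by push_cast; ring
  have hcast2 : ((d.2.2.1.toNat : Int)) + ((d.2.2.2.toNat : Int))
      = (((d.2.2.1.toNat + d.2.2.2.toNat : Nat)) : Int) := by push_cast; ring
  rw [hcast1, hcast2, PySem.Int.floordiv_natCast, PySem.Int.mod_natCast]
  have key : ((k / (d.2.2.1.toNat + d.2.2.2.toNat) * d.2.2.1.toNat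
        + min (k % (d.2.2.1.toNat + d.2.2.2.toNat) + 1) d.2.2.1.toNat : Nat) : Int)
      = (((k + 1) / (d.2.2.1.toNat + d.2.2.2.toNat) * d.2.2.1.toNat
        + min ((k + 1) % (d.2.2.1.toNat + d.2.2.2.toNat)) d.2.2.1.toNat : Nat) : Int) := by
    exact_mod_cast congrArg (Nat.cast (R := Int)) (natKey d.2.2.1.toNat d.2.2.2.toNat k hC)
  push_cast at key ⊢
  linear_combination d.2.1 * key

-- increment-at-each-leader fold, read pointwise
theorem modifyFold_getElem? (L : List (Int × Int)) (hL : (L.map (fun p => p.1)).Nodup)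
    (hpos : ∀ x ∈ L, 0 ≤ x.1) :
    ∀ (pts : List Int) (j : Nat),
      (L.foldl (fun x y => x.modify y.1.toNat fun x => x + 1) pts)[j]?
        = if ((j : Int) ∈ L.map (fun p => p.1)) then pts[j]?.map (· + 1) else pts[j]? := by
  induction L with
  | nil => intro pts j; simp
  | cons d L ih =>
    intro pts j
    have hd0 : 0 ≤ d.1 := hpos d List.mem_cons_self
    have hnd : (L.map (fun p => p.1)).Nodup := by
      simp only [List.map_cons, List.nodup_cons] at hL
      exact hL.2
    have hd1 : d.1 ∉ L.map (fun p => p.1) := by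
      simp only [List.map_cons, List.nodup_cons] at hL
      exact hL.1
    simp only [List.foldl_cons]
    rw [ih hnd (fun x hx => hpos x (List.mem_cons_of_mem d hx))]
    by_cases hdj : j = d.1.toNat
    · have hjd : (j : Int) = d.1 := by omega
      have hjL : (j : Int) ∉ L.map (fun p => p.1) := by rw [hjd]; exact hd1
      rw [if_neg hjL, if_pos (by rw [hjd]; simp)]
      rw [List.getElem?_modify]
      cases pts[j]? with
      | none => rfl
      | some v => simp [hdj]
    · have hjd : (j : Int) ≠ d.1 := by omega
      have hmem : ((j : Int) ∈ (d :: L).map (fun p => p.1)) ↔ ((j : Int) ∈ L.map (fun p => p.1)) := by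
        simp only [List.map_cons, List.mem_cons]
        exact or_iff_right hjd
      rw [List.getElem?_modify]
      simp only [hmem]
      have harm : (fun a => if d.1.toNat = j then a + 1 else a) <$> pts[j]? = pts[j]? := by
        cases pts[j]? with
        | none => rfl
        | some v =>
          show some (if d.1.toNat = j then v + 1 else v) = some v
          rw [if_neg (fun h => hdj (Eq.symm h))]
      rw [harm]

theorem roundEq (best : Int) (sd : List Int) :
    ∀ (pts : List Int), pts.length = sd.length →
      List.foldl (fun x (y : Int × Int) => x.modify y.1.toNat fun x => x + 1) pts
          (List.filter (fun p => p.2 == best) (PySem.List.enumerate sd 0))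
        = List.zipWith (fun p dd => if dd = best then p + 1 else p) pts sd := by
  intro pts hlen
  set L := List.filter (fun p : Int × Int => p.2 == best) (PySem.List.enumerate sd 0) with hLdef
  have hLpair : (L.map (fun p => p.1)).Pairwise (· < ·) := by
    apply List.Pairwise.map
    · intro a b hab; exact hab
    · exact List.Pairwise.filter _ (PySem.List.pairwise_lt_enumerate sd 0)
  have hLnodup : (L.map (fun p => p.1)).Nodup := hLpair.imp ne_of_lt
  have hLpos : ∀ x ∈ L, 0 ≤ x.1 := by
    intro x hx
    obtain ⟨k, hks, rfl⟩ := (PySem.List.mem_enumerate_iff sd 0 x).mp (List.mem_of_mem_filter hx)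
    simp
  have hmemL : ∀ (j : Nat), ((j : Int) ∈ L.map (fun p => p.1)) ↔ ∃ (h : j < sd.length), sd[j] = best := by
    intro j
    constructor
    · intro hj
      obtain ⟨p, hp, hp1⟩ := List.mem_map.mp hj
      have hp2 := (List.mem_filter.mp hp).2
      obtain ⟨k, hks, rfl⟩ := (PySem.List.mem_enumerate_iff sd 0 p).mp (List.mem_filter.mp hp).1
      have hkj : k = j := by simp at hp1; omega
      subst hkj
      exact ⟨hks, by simpa using hp2⟩
    · rintro ⟨hjs, hbest⟩
      apply List.mem_map.mpr
      refine ⟨((j : Int), sd[j]), ?_, rfl⟩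
      apply List.mem_filter.mpr
      refine ⟨?_, by simpa using hbest⟩
      exact (PySem.List.mem_enumerate_iff sd 0 _).mpr ⟨j, hjs, by simp⟩
  apply List.ext_getElem?
  intro j
  rw [modifyFold_getElem? L hLnodup hLpos pts j, List.getElem?_zipWith]
  by_cases hjs : j < sd.length
  · have hjp : j < pts.length := by omega
    rw [List.getElem?_eq_getElem hjs, List.getElem?_eq_getElem hjp]
    by_cases hb : sd[j] = best
    · rw [if_pos ((hmemL j).mpr ⟨hjs, hb⟩)]
      simp [hb]
    · rw [if_neg (fun hj => hb ((hmemL j).mp hj).2)]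
      simp [hb]
  · have hjp : ¬ j < pts.length := by omega
    rw [List.getElem?_eq_none (by omega), List.getElem?_eq_none (by omega)]
    have : ¬ ((j : Int) ∈ L.map (fun p => p.1)) := fun hj => hjs ((hmemL j).mp hj).1
    simp [this]

-- the per-second distance list A computes equals B's closed-form distance list
theorem sdEq (deer : List (String × Int × Int × Int))
    (hpre2 : ∀ d ∈ deer, 0 < max d.2.2.1 0 + max d.2.2.2 0) (y : Nat) (hy : y < 2504) :
    List.map ((fun j => ((PySem.List.pyGet? (List.map (travelA 2503) deer) j).getD [])[y]?.getD 0)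
        ∘ (fun (k : Nat) => (k : Int))) (List.range deer.length)
      = List.map (fun d => distanceB d.2.1 d.2.2.1 d.2.2.2 (1 + (y : Int))) deer := by
  apply List.ext_getElem
  · simp
  · intro n h1 h2
    simp only [List.getElem_map, List.getElem_range, Function.comp]
    rw [PySem.List.pyGet?_natCast]
    have hn : n < deer.length := by simpa using h2
    rw [List.getElem?_map, List.getElem?_eq_getElem hn]
    simp only [Option.map_some, Option.getD_some]
    have ht := travel_get deer[n] (hpre2 deer[n] (List.getElem_mem hn)) y hy
    rw [PySem.List.pyGet?_natCast] at ht
    rw [ht]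
    exact congrArg (distanceB deer[n].2.1 deer[n].2.2.1 deer[n].2.2.2) (by ring)

theorem loopEq (deer : List (String × Int × Int × Int))
    (hpre2 : ∀ d ∈ deer, 0 < max d.2.2.1 0 + max d.2.2.2 0) :
    ∀ (m : Nat), m ≤ 2503 → ∀ (pts : List Int), pts.length = deer.length →
      (List.range m).foldl (fun x (y : Nat) =>
          List.foldl (fun x (y : Int × Int) => x.modify y.1.toNat fun x => x + 1) x
            (List.filter
              (fun p => p.2 ==
                (PySem.List.max?
                  (List.map ((fun j => ((PySem.List.pyGet? (List.map (travelA 2503) deer) j).getD [])[y]?.getD 0)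
                    ∘ fun (k : Nat) => (k : Int)) (List.range deer.length)) fun x => x).getD 0)
              (PySem.List.enumerate
                (List.map ((fun j => ((PySem.List.pyGet? (List.map (travelA 2503) deer) j).getD [])[y]?.getD 0)
                  ∘ fun (k : Nat) => (k : Int)) (List.range deer.length)) 0))) pts
        = (List.range m).foldl (fun x (y : Nat) =>
            List.zipWith (fun p dd =>
                if dd = (PySem.List.max? (List.map (fun d => distanceB d.2.1 d.2.2.1 d.2.2.2 (1 + (y : Int))) deer)
                    fun x => x).getD 0
                then p + 1 else p)
              x (List.map (fun d => distanceB d.2.1 d.2.2.1 d.2.2.2 (1 + (y : Int))) deer)) pts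
      ∧ ((List.range m).foldl (fun x (y : Nat) =>
            List.zipWith (fun p dd =>
                if dd = (PySem.List.max? (List.map (fun d => distanceB d.2.1 d.2.2.1 d.2.2.2 (1 + (y : Int))) deer)
                    fun x => x).getD 0
                then p + 1 else p)
              x (List.map (fun d => distanceB d.2.1 d.2.2.1 d.2.2.2 (1 + (y : Int))) deer)) pts).length
          = deer.length := by
  intro m
  induction m with
  | zero => intro _ pts hlen; exact ⟨rfl, hlen⟩
  | succ m ih =>
    intro hm pts hlen
    obtain ⟨heq, hlen'⟩ := ih (by omega) pts hlen
    rw [List.range_succ]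
    simp only [List.foldl_append, List.foldl_cons, List.foldl_nil]
    rw [heq, sdEq deer hpre2 m (by omega)]
    constructor
    · exact roundEq _ _ _ (by rw [hlen']; simp)
    · rw [List.length_zipWith, hlen', List.length_map]
      exact Nat.min_self _
-- ===== VERDICT (by name: the statement is the Claim_ definition above) =====
set_option maxRecDepth 8000 in
set_option maxHeartbeats 1600000 in
theorem part2_spec : Claim_equal_part2 := by
  intro deer hdom hpre
  unfold Spec_part2 part2 part2_alt
  simp only [PySem.List.foldl_append_singleton_eq_map, List.nil_append,
    PySem.List.pyRange_one, List.foldl_map]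
  norm_num
  rw [show (Int.toNat 2503) = 2503 from rfl]
  rw [(loopEq deer hpre.2 2503 (by norm_num) (List.replicate deer.length 0)
    (by simp)).1]
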